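-- pv_equiv track=rewrite | github.com/zuigehulu/AID1811 | pbase/day15/code/text5.py | xunzhao
-- ===== SOURCE A (Python) =====
-- def xunzhao(str1):
--     i = 0
--     while True:
--         s = str1[i]
--         d = str1[i+1:]
--         if i+1 == len(str1):
--             return -1
--         if s not in d:
--             return i
--         else:
--             i += 1
-- ===== SOURCE B (Python) =====
-- def xunzhao(str1):
--     # one right-to-left pass with a set of characters seen so far (O(n))
--     seen = {str1[-1]}          # the last character; never a candidate index in A's scan
--     ans = -1
--     for i in range(len(str1) - 2, -1, -1):
--         if str1[i] not in seen:
--             ans = i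
--         seen.add(str1[i])
--     return ans
-- ===== Notes on version B (the rewrite author's own statement) =====
-- stated objective: faster
-- what changed: Replaces the left-to-right scan that searches the whole remaining suffix at each index with a single right-to-left pass maintaining a set of already-seen characters.
import Mathlib
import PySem

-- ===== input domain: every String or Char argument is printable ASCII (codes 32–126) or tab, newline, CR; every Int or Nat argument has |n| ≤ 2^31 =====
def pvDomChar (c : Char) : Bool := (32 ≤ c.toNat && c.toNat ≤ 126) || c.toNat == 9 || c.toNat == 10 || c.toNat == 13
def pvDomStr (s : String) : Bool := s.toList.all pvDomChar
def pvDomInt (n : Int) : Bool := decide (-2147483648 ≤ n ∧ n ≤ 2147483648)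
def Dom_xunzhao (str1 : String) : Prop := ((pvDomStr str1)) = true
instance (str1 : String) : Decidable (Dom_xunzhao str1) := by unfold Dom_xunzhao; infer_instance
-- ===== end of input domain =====

-- B replaces A's quadratic scan (a membership test over the whole remaining suffix
-- at every index) by one right-to-left pass keeping a set of already-seen characters.

-- ===== PORT A =====
-- A's while-loop, step for step: s = str1[i]; d = str1[i+1:]; the two branch tests
-- in A's order.  's not in d' with s a single character is character membership.
def xunzhaoLoop (cs : List Char) (i : Nat) : Int :=
  match h : PySem.List.pyGet? cs (i : Int) with
  | none => 0          -- IndexError (only the empty string reaches this; outside Pre_)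
  | some s =>
    let d := PySem.List.slice cs (some ((i : Int) + 1)) none
    if (i : Int) + 1 = PySem.List.len cs then -1
    else if s ∈ d then xunzhaoLoop cs (i + 1)
    else (i : Int)
  termination_by cs.length - i
  decreasing_by
    simp only [PySem.List.pyGet?_natCast] at h
    have hi : i < cs.length := by
      by_contra hc
      rw [List.getElem?_eq_none (by omega)] at h
      cases h
    omega

def xunzhao (str1 : String) : Int := xunzhaoLoop str1.toList 0

-- ===== PORT B =====
-- Source B's loop body: read str1[i], keep the earlier answer or take i, add to seen
def bStep (cs : List Char) (p : PySem.Set Char × Int) (i : Int) : PySem.Set Char × Int :=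
  let c := PySem.List.pyGetD cs i ' '   -- str1[i]; i is always in range here
  (PySem.Set.add p.1 c, if c ∈ p.1 then p.2 else i)

-- Source B: seen = {str1[-1]}; for i in range(len(str1)-2, -1, -1): test, update ans, add.
def xunzhao_alt (str1 : String) : Int :=
  match PySem.List.pyGet? str1.toList (-1) with
  | none => 0          -- IndexError on the empty string (outside Pre_)
  | some last =>
    ((PySem.List.pyRange ((str1.toList.length : Int) - 2) (-1) (-1)).foldl
      (bStep str1.toList)
      (PySem.Set.ofList [last], -1)).2

-- ===== PRECONDITION & SPEC =====
-- A raises IndexError (str1[0]) on the empty string; excluded here.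
def Pre_xunzhao (str1 : String) : Prop := str1.toList ≠ []
instance (str1 : String) : Decidable (Pre_xunzhao str1) := by unfold Pre_xunzhao; infer_instance
def pvWitness_xunzhao : String := "ab"

def Spec_xunzhao (str1 : String) (out : Int) : Prop := out = xunzhao_alt str1
instance (str1 : String) (out : Int) : Decidable (Spec_xunzhao str1 out) := by unfold Spec_xunzhao; infer_instance

-- ===== CLAIM (what is proved, stated in full; the proofs are below) =====
def Claim_equal_xunzhao : Prop := ∀ (str1 : String), Dom_xunzhao str1 → Pre_xunzhao str1 → Spec_xunzhao str1 (xunzhao str1)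

-- ===== LEMMAS AND PROOFS =====

-- index j qualifies: its character does not occur later in the string
def fgood (cs : List Char) (j : Nat) : Bool := decide (cs.getD j ' ' ∉ cs.drop (j + 1))

-- what A's loop computes from position i: the first qualifying index in [i, length-2]
def specFrom (cs : List Char) (i : Nat) : Int :=
  match (List.range' i (cs.length - 1 - i)).find? (fgood cs) with
  | some j => (j : Int)
  | none => -1

-- what B's fold computes after processing indices k-1, …, 0 with accumulator a:
-- the first qualifying index below k, else a
def bspec (cs : List Char) (k : Nat) (a : Int) : Int :=
  match (List.range k).find? (fgood cs) with
  | some j => (j : Int)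
  | none => a

lemma fgood_false (cs : List Char) (k : Nat) (hk : k < cs.length)
    (h : cs[k] ∈ cs.drop (k + 1)) : fgood cs k = false := by
  simp [fgood, List.getD_eq_getElem?_getD, List.getElem?_eq_getElem hk, h]

lemma fgood_true (cs : List Char) (k : Nat) (hk : k < cs.length)
    (h : cs[k] ∉ cs.drop (k + 1)) : fgood cs k = true := by
  simp [fgood, List.getD_eq_getElem?_getD, List.getElem?_eq_getElem hk, h]

lemma xunzhaoLoop_eq_specFrom (cs : List Char) :
    ∀ (fuel i : Nat), cs.length - i ≤ fuel → i < cs.length →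
      xunzhaoLoop cs i = specFrom cs i := by
  intro fuel
  induction fuel with
  | zero => intro i h hi; omega
  | succ f ih =>
    intro i h hi
    rw [xunzhaoLoop]
    rw [PySem.List.pyGet?_natCast, List.getElem?_eq_getElem hi]
    simp only [PySem.List.len_eq]
    have hcast : (i : Int) + 1 = ((i + 1 : Nat) : Int) := by push_cast; ring
    rw [hcast, PySem.List.slice_from_natCast]
    by_cases hend : i + 1 = cs.length
    · rw [if_pos (by exact_mod_cast hend)]
      unfold specFrom
      have h0 : cs.length - 1 - i = 0 := by omega
      rw [h0]
      simp [List.range']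
    · have hne : ((i + 1 : Nat) : Int) ≠ (cs.length : Int) := by
        intro hc; exact hend (by exact_mod_cast hc)
      rw [if_neg hne]
      have hlt : i + 1 < cs.length := by omega
      have hrange : cs.length - 1 - i = (cs.length - 1 - (i + 1)) + 1 := by omega
      unfold specFrom
      rw [hrange, List.range'_succ]
      by_cases hmem : cs[i] ∈ cs.drop (i + 1)
      · rw [if_pos hmem]
        rw [List.find?_cons_of_neg (by simp [fgood_false cs i hi hmem])]
        rw [ih (i + 1) (by omega) hlt]
        rfl
      · rw [if_neg hmem]
        rw [List.find?_cons_of_pos (fgood_true cs i hi hmem)]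

lemma foldB_eq_bspec (cs : List Char) :
    ∀ (k : Nat), k ≤ cs.length → ∀ (S : PySem.Set Char) (a : Int),
      (∀ c, c ∈ S ↔ c ∈ cs.drop k) →
      ((PySem.List.pyRange ((k : Int) - 1) (-1) (-1)).foldl (bStep cs) (S, a)).2
        = bspec cs k a := by
  intro k
  induction k with
  | zero =>
    intro _ S a _
    rw [PySem.List.pyRange_neg_one_eq_nil (by norm_num)]
    simp [bspec]
  | succ k ih =>
    intro hk S a hS
    have hkl : k < cs.length := by omega
    have h1 : ((k + 1 : Nat) : Int) - 1 = (k : Int) := by push_cast; ring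
    rw [h1, PySem.List.pyRange_neg_one_cons (by omega), List.foldl_cons]
    have hget : PySem.List.pyGetD cs ((k : Nat) : Int) ' ' = cs[k] := by
      rw [PySem.List.pyGetD_natCast, List.getD_eq_getElem?_getD,
        List.getElem?_eq_getElem hkl]
      rfl
    have hdropk : cs.drop k = cs[k] :: cs.drop (k + 1) := List.drop_eq_getElem_cons hkl
    have hmemS : cs[k] ∈ S ↔ cs[k] ∈ cs.drop (k + 1) := hS cs[k]
    have hstep : bStep cs (S, a) ((k : Nat) : Int)
        = (PySem.Set.add S cs[k], if cs[k] ∈ cs.drop (k + 1) then a else (k : Int)) := by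
      simp only [bStep, hget]
      rw [if_congr hmemS rfl rfl]
    rw [hstep]
    rw [ih (by omega) (PySem.Set.add S cs[k]) _
      (by
        intro c
        rw [PySem.Set.mem_add, hS c, hdropk, List.mem_cons]
        exact or_comm)]
    unfold bspec
    rw [List.range_succ, List.find?_append]
    cases hf : (List.range k).find? (fgood cs) with
    | some j => simp
    | none =>
      simp only [Option.none_or]
      by_cases hmem : cs[k] ∈ cs.drop (k + 1)
      · rw [List.find?_cons_of_neg (by simp [fgood_false cs k hkl hmem])]
        simp [hmem]
      · rw [List.find?_cons_of_pos (fgood_true cs k hkl hmem)]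
        simp [hmem]

-- ===== VERDICT (by name: the statement is the Claim_ definition above) =====
theorem xunzhao_spec : Claim_equal_xunzhao := by
  intro str1 _ hpre
  unfold Spec_xunzhao xunzhao xunzhao_alt
  have hne : str1.toList ≠ [] := hpre
  have hlen : 0 < str1.toList.length := List.length_pos_iff.mpr hne
  rw [PySem.List.pyGet?_neg_one, List.getLast?_eq_some_getLast hne]
  show xunzhaoLoop str1.toList 0 =
    ((PySem.List.pyRange ((str1.toList.length : Int) - 2) (-1) (-1)).foldl
      (bStep str1.toList) (PySem.Set.ofList [str1.toList.getLast hne], -1)).2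
  have hcast2 : (str1.toList.length : Int) - 2 = ((str1.toList.length - 1 : Nat) : Int) - 1 := by
    omega
  rw [hcast2]
  rw [foldB_eq_bspec str1.toList (str1.toList.length - 1) (by omega) _ _
    (by
      intro c
      rw [PySem.Set.mem_ofList, List.drop_length_sub_one hne])]
  rw [xunzhaoLoop_eq_specFrom str1.toList str1.toList.length 0 (by omega) hlen]
  unfold specFrom bspec
  rw [Nat.sub_zero, ← List.range_eq_range']
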